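-- pv_equiv track=rewrite | github.com/AadithiyaD/ProjectEuler | PythonAttempts/prob23.py | abundant_sums
-- ===== SOURCE A (Python) =====
-- from math import sqrt
--
-- def divisor_sums(n):
--     """
--     Function to calculate sum of divisors of the number n
--     """
--     divisors = set()
--     divisors.add(1) # In the problem, the number itself is not conted, so we manually add 1 to avoid listing the number itself as
--                     # a factor
--     for i in range(2, int(sqrt(n)) + 1):
--         if n % i == 0:
--             divisors.add(i)
--             if i != n // i:
--                 divisors.add(n // i) # If i divides n, then n // i also divides n
--
--     return sum(divisors)
--
-- def abundant_nums(limit):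
--     """
--     Function to generate a list of abundant numbers up to limit
--     :param limit: the upper limit of abundant numbers to generate
--     :return: a list of abundant numbers up to limit
--     """
--     nums = [x for x in range(1,limit + 1) if divisor_sums(x) > x]
--     return nums
--
-- def abundant_sums(n):
--     """
--     Function to generate a set of sums of two abundant numbers up to n
--     :param n: the upper limit of the abundant number sums to generate
--     :return: a set of sums of two abundant numbers up to n
--     """
--     input_numbers = abundant_nums(limit)
--     result = set()
--     for i in range(len(input_numbers)):
--         for j in range(i, len(input_numbers)):
--             s = input_numbers[i] + input_numbers[j]
--             if s <= n:
--                 result.add(s)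
--             else:
--                 break
--
--     return result
--
-- limit = 28123
-- ===== SOURCE B (Python) =====
-- from math import sqrt
--
-- def divisor_sums(n):
--     divisors = set()
--     divisors.add(1)
--     for i in range(2, int(sqrt(n)) + 1):
--         if n % i == 0:
--             divisors.add(i)
--             if i != n // i:
--                 divisors.add(n // i)
--     return sum(divisors)
--
-- def abundant_nums(limit):
--     return [x for x in range(1, limit + 1) if divisor_sums(x) > x]
--
-- def abundant_sums(n):
--     nums = abundant_nums(limit)
--     mask = 0                        # bit b set <=> b is an abundant number (b <= limit)
--     for b in nums:
--         mask |= 1 << b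
--     result = set()
--     seen = 0                        # bit s set <=> sum s is already in result
--     for a in nums:
--         hi = min(n, a + limit)      # sums whose smaller addend is a lie in [2*a, hi]
--         width = hi + 1 - 2 * a
--         if width <= 0:
--             continue
--         # one shift/mask yields every sum a+b with b abundant, a <= b, a+b <= hi
--         row = ((mask >> a) & ((1 << width) - 1)) << (2 * a)
--         new = row & ~seen           # drop sums already produced by a smaller addend
--         seen |= row
--         news = []
--         while new:                  # peel the new sums off the top ...
--             s = new.bit_length() - 1
--             news.append(s)
--             new -= 1 << s
--         for s in reversed(news):    # ... and record them in increasing order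
--             result.add(s)
--     return result
--
-- limit = 28123
-- ===== Notes on version B (the rewrite author's own statement) =====
-- stated objective: faster
-- what changed: The pairwise generate-and-break enumeration is replaced by a big-integer bitset sumset: the abundant numbers become one bitmask, each row of sums is produced word-parallel by a shift/mask of that bitmask, and only the not-yet-seen sums (row & ~seen) are extracted bit by bit, so no per-pair Python-level work remains.
import Mathlib
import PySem

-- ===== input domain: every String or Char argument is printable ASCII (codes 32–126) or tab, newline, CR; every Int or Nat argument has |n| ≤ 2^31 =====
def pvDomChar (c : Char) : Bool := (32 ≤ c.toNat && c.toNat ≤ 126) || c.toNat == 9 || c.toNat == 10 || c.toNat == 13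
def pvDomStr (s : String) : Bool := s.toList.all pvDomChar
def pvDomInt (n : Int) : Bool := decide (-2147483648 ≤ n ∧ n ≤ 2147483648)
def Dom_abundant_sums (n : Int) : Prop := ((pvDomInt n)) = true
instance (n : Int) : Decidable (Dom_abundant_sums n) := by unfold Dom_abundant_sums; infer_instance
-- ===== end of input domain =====

-- B replaces A's pairwise generate-and-break enumeration by a big-integer bitset sumset (one bitmask of
-- abundant numbers, each row of sums produced by a shift/mask, only unseen sums extracted bit by bit);
-- return-value equivalence only (no argument mutation in either program).

-- ===== PORT A =====
-- int(sqrt(n)) of the Python: exact for 0 ≤ n ≤ 2^52 (here always called with 1 ≤ n ≤ 28123)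
def pvIsqrt (n : Int) : Int := (Nat.sqrt n.toNat : Int)

def divisor_sums (n : Int) : Int :=
  let divisors : PySem.Set Int := PySem.Set.add PySem.Set.empty 1
  let divisors := (PySem.List.pyRange 2 (pvIsqrt n + 1) 1).foldl (fun ds i =>
    if PySem.Int.mod n i = 0 then
      let ds := PySem.Set.add ds i
      if i ≠ PySem.Int.floordiv n i then PySem.Set.add ds (PySem.Int.floordiv n i) else ds
    else ds) divisors
  -- sum(divisors): a sum over a Python set is iteration-order independent (+ commutes)
  divisors.sum

def abundant_nums (lim : Int) : List Int :=
  (PySem.List.pyRange 1 (lim + 1) 1).filter (fun x => decide (divisor_sums x > x))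

-- 'for j in range(i, len(input))' reading input[j], with break: structural recursion over the suffix
-- input[i:], same elements in the same order; 'break' = stop.
def innerA (n a : Int) : List Int → PySem.Set Int → PySem.Set Int
  | [], acc => acc
  | b :: bs, acc => if a + b ≤ n then innerA n a bs (PySem.Set.add acc (a + b)) else acc

-- 'for i in range(len(input))' reading input[i]: structural recursion over suffixes.
def outerA (n : Int) : List Int → PySem.Set Int → PySem.Set Int
  | [], acc => acc
  | a :: rest, acc => outerA n rest (innerA n a (a :: rest) acc)

def abundant_sums (n : Int) : List Int :=
  let input_numbers := abundant_nums 28123   -- global 'limit = 28123'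
  outerA n input_numbers PySem.Set.empty

-- ===== PORT B =====
-- Python's bitwise int operators, ported by hand (PySem has no bitwise primitives): each is exact for
-- the NONNEGATIVE operands B ever applies it to (every mask B builds is ≥ 0).
def pvShl (x k : Int) : Int := ((x.toNat <<< k.toNat : Nat) : Int)   -- x << k, exact for x ≥ 0, k ≥ 0
def pvShr (x k : Int) : Int := ((x.toNat >>> k.toNat : Nat) : Int)   -- x >> k, exact for x ≥ 0, k ≥ 0
def pvOr  (x y : Int) : Int := ((x.toNat ||| y.toNat : Nat) : Int)   -- x | y,  exact for x, y ≥ 0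
def pvAnd (x y : Int) : Int := ((x.toNat &&& y.toNat : Nat) : Int)   -- x & y,  exact for x, y ≥ 0
-- x & ~y: for x, y ≥ 0 it equals x ^ (x & y) (clear y's bits from x), which stays in ℕ
def pvAndNot (x y : Int) : Int := ((x.toNat ^^^ (x.toNat &&& y.toNat) : Nat) : Int)

-- ---- bit-length facts needed to justify termination of B's while loop ----
def bitLenN (m : Nat) : Nat := PySem.Int.bitLength (m : Int)

lemma bitLenN_succ (m : Nat) (h : 0 < m) : bitLenN m = bitLenN (m / 2) + 1 := by
  unfold bitLenN
  exact PySem.Int.bitLength_natCast h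

lemma bitLenN_bounds : ∀ m : Nat, 0 < m → 2 ^ (bitLenN m - 1) ≤ m ∧ m < 2 ^ bitLenN m := by
  intro m
  induction m using Nat.strong_induction_on with
  | _ m ih =>
    intro hm
    rw [bitLenN_succ m hm]
    rcases Nat.lt_or_ge m 2 with h2 | h2
    · have hm1 : m = 1 := by omega
      subst hm1
      norm_num [show bitLenN 0 = 0 from rfl]
    · have hh : 0 < m / 2 := by omega
      obtain ⟨ih1, ih2⟩ := ih (m / 2) (by omega) hh
      have hk : 0 < bitLenN (m / 2) := by rw [bitLenN_succ _ hh]; omega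
      have e1 : 2 ^ bitLenN (m / 2) = 2 * 2 ^ (bitLenN (m / 2) - 1) := by
        conv_lhs => rw [show bitLenN (m / 2) = (bitLenN (m / 2) - 1) + 1 by omega]
        rw [pow_succ]; ring
      have e2 : 2 ^ (bitLenN (m / 2) + 1) = 2 * 2 ^ bitLenN (m / 2) := by rw [pow_succ]; ring
      constructor
      · simp only [Nat.add_sub_cancel]
        omega
      · omega

lemma bitLenN_pos (m : Nat) (h : 0 < m) : 0 < bitLenN m := by
  rw [bitLenN_succ m h]; omega

lemma pvShl_one (s : Int) (_h : 0 ≤ s) : pvShl 1 s = ((2 ^ s.toNat : Nat) : Int) := by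
  simp [pvShl, Nat.shiftLeft_eq]

lemma peel_arg (m : Nat) (h : 0 < m) :
    (m : Int) - pvShl 1 (((PySem.Int.bitLength (m : Int) : Nat) : Int) - 1) =
      ((m - 2 ^ (bitLenN m - 1) : Nat) : Int) := by
  have hk : 0 < bitLenN m := bitLenN_pos m h
  have hs0 : (0 : Int) ≤ ((bitLenN m : Nat) : Int) - 1 := by
    have : (1 : Int) ≤ ((bitLenN m : Nat) : Int) := by exact_mod_cast hk
    omega
  have htn : (((bitLenN m : Nat) : Int) - 1).toNat = bitLenN m - 1 := by omega
  show (m : Int) - pvShl 1 (((bitLenN m : Nat) : Int) - 1) = _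
  rw [pvShl_one _ hs0, htn]
  have hle : 2 ^ (bitLenN m - 1) ≤ m := (bitLenN_bounds m h).1
  rw [Nat.cast_sub hle]

-- termination fact for B's while loop: subtracting the top bit 1 << (new.bit_length()-1) decreases new
lemma peel_decreasing (new : Int) (h : 0 < new) :
    (new - pvShl 1 (((PySem.Int.bitLength new : Nat) : Int) - 1)).toNat < new.toNat := by
  have hm : 0 < new.toNat := by omega
  have hcast : ((new.toNat : Nat) : Int) = new := Int.toNat_of_nonneg (le_of_lt h)
  have := peel_arg new.toNat hm
  rw [hcast] at this
  rw [this]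
  have hle : 2 ^ (bitLenN new.toNat - 1) ≤ new.toNat := (bitLenN_bounds new.toNat hm).1
  have hp : 0 < 2 ^ (bitLenN new.toNat - 1) := Nat.two_pow_pos _
  omega

-- B's 'while new: s = new.bit_length() - 1; news.append(s); new -= 1 << s' collecting news
def peelB (new : Int) : List Int :=
  if h : 0 < new then   -- 'while new': new is a nonnegative mask, so new ≠ 0 means 0 < new
    let s : Int := ((PySem.Int.bitLength new : Nat) : Int) - 1
    s :: peelB (new - pvShl 1 s)
  else []
  termination_by new.toNat
  decreasing_by exact peel_decreasing new h

-- B's 'for a in nums' loop: structural recursion over the list, state = (result, seen)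
def loopB (n mask : Int) : List Int → PySem.Set Int → Int → PySem.Set Int
  | [], result, _seen => result
  | a :: rest, result, seen =>
      let hi := min n (a + 28123)      -- global 'limit = 28123'
      let width := hi + 1 - 2 * a
      if width ≤ 0 then loopB n mask rest result seen   -- 'continue'
      else
        let row := pvShl (pvAnd (pvShr mask a) (pvShl 1 width - 1)) (2 * a)
        let new := pvAndNot row seen
        -- 'news = peel loop; for s in reversed(news): result.add(s)'
        loopB n mask rest ((peelB new).reverse.foldl (fun r s => PySem.Set.add r s) result)
          (pvOr seen row)

def abundant_sums_alt (n : Int) : List Int :=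
  let nums := abundant_nums 28123            -- global 'limit = 28123'
  let mask := nums.foldl (fun m b => pvOr m (pvShl 1 b)) 0
  loopB n mask nums PySem.Set.empty 0

-- ===== PRECONDITION & SPEC =====
def Spec_abundant_sums (n : Int) (out : List Int) : Prop := out = abundant_sums_alt n
instance (n : Int) (out : List Int) : Decidable (Spec_abundant_sums n out) := by unfold Spec_abundant_sums; infer_instance

-- ===== CLAIM (what is proved, stated in full; the proofs are below) =====
def Claim_equal_abundant_sums : Prop := ∀ (n : Int), Dom_abundant_sums n → Spec_abundant_sums n (abundant_sums n)

-- ===== LEMMAS AND PROOFS =====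

-- ---------- generic list lemmas ----------

-- two strictly increasing lists with the same members are equal
lemma eq_of_pairwise_lt_of_mem_iff :
    ∀ (l₁ l₂ : List Int), l₁.Pairwise (· < ·) → l₂.Pairwise (· < ·) →
      (∀ x, x ∈ l₁ ↔ x ∈ l₂) → l₁ = l₂
  | [], [], _, _, _ => rfl
  | [], y :: t₂, _, _, h => by
      have := (h y).mpr (by simp)
      simp at this
  | x :: t₁, [], _, _, h => by
      have := (h x).mp (by simp)
      simp at this
  | x :: t₁, y :: t₂, h₁, h₂, h => by
      obtain ⟨hx1, hp1⟩ := List.pairwise_cons.mp h₁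
      obtain ⟨hx2, hp2⟩ := List.pairwise_cons.mp h₂
      have hxy : x = y := by
        rcases List.mem_cons.mp ((h x).mp (by simp)) with he | hm
        · exact he
        · rcases List.mem_cons.mp ((h y).mpr (by simp)) with he | hm'
          · omega
          · have := hx1 y hm'
            have := hx2 x hm
            omega
      subst hxy
      have htail : ∀ z, z ∈ t₁ ↔ z ∈ t₂ := by
        intro z
        constructor
        · intro hz
          rcases List.mem_cons.mp ((h z).mp (List.mem_cons_of_mem _ hz)) with he | hm
          · have := hx1 z hz; omega
          · exact hm
        · intro hz
          rcases List.mem_cons.mp ((h z).mpr (List.mem_cons_of_mem _ hz)) with he | hm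
          · have := hx2 z hz; omega
          · exact hm
      rw [eq_of_pairwise_lt_of_mem_iff t₁ t₂ hp1 hp2 htail]

-- on a (≤)-sorted list, membership in takeWhile (a + · ≤ n) = membership plus the bound
lemma mem_takeWhile_sorted (a n : Int) :
    ∀ (l : List Int), l.Pairwise (· ≤ ·) → ∀ b,
      (b ∈ l.takeWhile (fun x => decide (a + x ≤ n)) ↔ b ∈ l ∧ a + b ≤ n)
  | [], _, b => by simp
  | x :: t, h, b => by
      obtain ⟨hx, hp⟩ := List.pairwise_cons.mp h
      by_cases hxn : a + x ≤ n
      · rw [List.takeWhile_cons_of_pos (by simpa using hxn)]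
        simp only [List.mem_cons]
        rw [mem_takeWhile_sorted a n t hp b]
        constructor
        · rintro (rfl | ⟨hb, hbn⟩)
          · exact ⟨Or.inl rfl, hxn⟩
          · exact ⟨Or.inr hb, hbn⟩
        · rintro ⟨rfl | hb, hbn⟩
          · exact Or.inl rfl
          · exact Or.inr ⟨hb, hbn⟩
      · rw [List.takeWhile_cons_of_neg (by simpa using hxn)]
        simp only [List.not_mem_nil, false_iff, not_and, List.mem_cons]
        rintro (rfl | hb)
        · intro hc; exact hxn hc
        · intro hc
          have := hx b hb
          omega

-- for strictly increasing L, the suffix L.drop i holds exactly the members ≥ L[i]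
lemma mem_drop_sorted (L : List Int) (hL : L.Pairwise (· < ·)) (i : Nat) (hi : i < L.length) (b : Int) :
    b ∈ L.drop i ↔ b ∈ L ∧ L[i] ≤ b := by
  have hmono : ∀ (p q : Nat) (hp : p < L.length) (hq : q < L.length), p < q → L[p] < L[q] :=
    fun p q hp hq hpq => (List.pairwise_iff_getElem.mp hL) p q hp hq hpq
  constructor
  · intro hb
    refine ⟨List.mem_of_mem_drop hb, ?_⟩
    obtain ⟨j, hj, hbj⟩ := List.mem_iff_getElem.mp hb
    have hjlen : i + j < L.length := by
      have := List.length_drop (l := L) (i := i); omega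
    rw [List.getElem_drop] at hbj
    subst hbj
    by_cases hj0 : j = 0
    · subst hj0; simp
    · exact le_of_lt (hmono i (i + j) hi hjlen (by omega))
  · rintro ⟨hb, hge⟩
    obtain ⟨j, hj, hbj⟩ := List.mem_iff_getElem.mp hb
    have hij : i ≤ j := by
      by_contra hc
      have := hmono j i hj hi (by omega)
      omega
    have hj' : j - i < (L.drop i).length := by
      rw [List.length_drop]; omega
    have : (L.drop i)[j - i] = b := by
      rw [List.getElem_drop]
      rw [← hbj]
      congr 1
      omega
    rw [← this]
    exact List.getElem_mem hj'

-- ---------- facts about the abundant list ----------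

lemma abundant_nums_lt : (abundant_nums 28123).Pairwise (· < ·) := by
  unfold abundant_nums
  exact (PySem.List.pairwise_lt_pyRange_one 1 28124).filter _

lemma abundant_nums_lb : ∀ b ∈ abundant_nums 28123, 1 ≤ b := by
  intro b hb
  unfold abundant_nums at hb
  have := (List.mem_filter.mp hb).1
  have := (PySem.List.mem_pyRange_one.mp this).1
  omega

lemma abundant_nums_ub : ∀ b ∈ abundant_nums 28123, b ≤ 28123 := by
  intro b hb
  unfold abundant_nums at hb
  have := (List.mem_filter.mp hb).1
  have := (PySem.List.mem_pyRange_one.mp this).2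
  omega

-- ---------- peelB: semantics of B's bit-extraction loop ----------

-- the top-bit decomposition m = 2^t + r with t = bitLenN m - 1, r < 2^t
lemma top_bit_decomp (m : Nat) (h : 0 < m) :
    m = 2 ^ (bitLenN m - 1) + (m - 2 ^ (bitLenN m - 1)) ∧
      m - 2 ^ (bitLenN m - 1) < 2 ^ (bitLenN m - 1) := by
  obtain ⟨h1, h2⟩ := bitLenN_bounds m h
  have hk : 0 < bitLenN m := bitLenN_pos m h
  have e1 : 2 ^ bitLenN m = 2 * 2 ^ (bitLenN m - 1) := by
    conv_lhs => rw [show bitLenN m = (bitLenN m - 1) + 1 by omega]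
    rw [pow_succ]; ring
  omega



lemma peelB_unfold (m : Nat) (h : 0 < m) :
    peelB (m : Int) =
      ((bitLenN m - 1 : Nat) : Int) :: peelB ((m - 2 ^ (bitLenN m - 1) : Nat) : Int) := by
  rw [peelB]
  have hpos : (0 : Int) < (m : Int) := by exact_mod_cast h
  rw [dif_pos hpos]
  have hk : 0 < bitLenN m := bitLenN_pos m h
  show (((PySem.Int.bitLength (m : Int) : Nat) : Int) - 1) ::
      peelB ((m : Int) - pvShl 1 (((PySem.Int.bitLength (m : Int) : Nat) : Int) - 1)) = _
  rw [peel_arg m h]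
  congr 1
  show ((bitLenN m : Nat) : Int) - 1 = ((bitLenN m - 1 : Nat) : Int)
  omega

lemma peelB_zero : peelB (0 : Int) = [] := by
  rw [peelB]; norm_num

-- members of peelB m are exactly the set bits of m
lemma peelB_mem : ∀ (m : Nat) (x : Int),
    x ∈ peelB (m : Int) ↔ ∃ s : Nat, x = (s : Int) ∧ m.testBit s = true := by
  intro m
  induction m using Nat.strong_induction_on with
  | _ m ih =>
    intro x
    rcases Nat.eq_zero_or_pos m with rfl | hm
    · rw [show ((0 : Nat) : Int) = (0 : Int) by norm_num, peelB_zero]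
      simp
    · obtain ⟨hdec, hr⟩ := top_bit_decomp m hm
      have hlt : m - 2 ^ (bitLenN m - 1) < m := by
        have : 0 < 2 ^ (bitLenN m - 1) := Nat.two_pow_pos _
        omega
      rw [peelB_unfold m hm, List.mem_cons, ih (m - 2 ^ (bitLenN m - 1)) hlt]
      have htop : m.testBit (bitLenN m - 1) = true := by
        have hc := congrArg (fun z => z.testBit (bitLenN m - 1)) hdec
        simp only at hc
        rw [hc, Nat.testBit_two_pow_add_eq, Nat.testBit_lt_two_pow hr]
        rfl
      constructor
      · rintro (rfl | ⟨s, rfl, hs⟩)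
        · exact ⟨bitLenN m - 1, rfl, htop⟩
        · have hst : s < bitLenN m - 1 := by
            have h1 : 2 ^ s ≤ m - 2 ^ (bitLenN m - 1) := Nat.ge_two_pow_of_testBit hs
            by_contra hc
            have : 2 ^ (bitLenN m - 1) ≤ 2 ^ s := Nat.pow_le_pow_right (by norm_num) (by omega)
            omega
          refine ⟨s, rfl, ?_⟩
          have hc := congrArg (fun z => z.testBit s) hdec
          simp only at hc
          rw [hc, Nat.testBit_two_pow_add_gt hst]
          exact hs
      · rintro ⟨s, rfl, hs⟩
        rcases Nat.lt_trichotomy s (bitLenN m - 1) with hst | hst | hst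
        · right
          refine ⟨s, rfl, ?_⟩
          have hc := congrArg (fun z => z.testBit s) hdec
          simp only at hc
          rw [hc, Nat.testBit_two_pow_add_gt hst] at hs
          exact hs
        · left; rw [hst]
        · exfalso
          have hbl : m < 2 ^ bitLenN m := (bitLenN_bounds m hm).2
          have hk : 0 < bitLenN m := bitLenN_pos m hm
          have h1 : bitLenN m ≤ s := by omega
          have : m < 2 ^ s :=
            lt_of_lt_of_le hbl (Nat.pow_le_pow_right (by norm_num) h1)
          rw [Nat.testBit_lt_two_pow this] at hs
          exact Bool.false_ne_true hs

-- peelB lists bits in strictly decreasing order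
lemma peelB_pairwise : ∀ m : Nat, (peelB (m : Int)).Pairwise (· > ·) := by
  intro m
  induction m using Nat.strong_induction_on with
  | _ m ih =>
    rcases Nat.eq_zero_or_pos m with rfl | hm
    · rw [show ((0 : Nat) : Int) = (0 : Int) by norm_num, peelB_zero]
      simp
    · obtain ⟨hdec, hr⟩ := top_bit_decomp m hm
      have hlt : m - 2 ^ (bitLenN m - 1) < m := by
        have : 0 < 2 ^ (bitLenN m - 1) := Nat.two_pow_pos _
        omega
      rw [peelB_unfold m hm]
      refine List.pairwise_cons.mpr ⟨?_, ih _ hlt⟩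
      intro y hy
      obtain ⟨s, rfl, hs⟩ := (peelB_mem (m - 2 ^ (bitLenN m - 1)) y).mp hy
      have hst : s < bitLenN m - 1 := by
        have h1 : 2 ^ s ≤ m - 2 ^ (bitLenN m - 1) := Nat.ge_two_pow_of_testBit hs
        by_contra hc
        have : 2 ^ (bitLenN m - 1) ≤ 2 ^ s := Nat.pow_le_pow_right (by norm_num) (by omega)
        omega
      exact_mod_cast hst

-- ---------- bit characterisation of B's abundant-number bitmask ----------

lemma mask_testBit (L : List Int) (hpos : ∀ b ∈ L, 0 ≤ b) :
    ∀ (m : Int) (s : Nat),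
      (L.foldl (fun m b => pvOr m (pvShl 1 b)) m).toNat.testBit s =
        (m.toNat.testBit s || decide ((s : Int) ∈ L)) := by
  induction L with
  | nil => intro m s; simp
  | cons b t ihL =>
    intro m s
    have hb0 : 0 ≤ b := hpos b (by simp)
    simp only [List.foldl_cons]
    rw [ihL (fun x hx => hpos x (List.mem_cons_of_mem _ hx)) (pvOr m (pvShl 1 b)) s]
    have h1 : (pvOr m (pvShl 1 b)).toNat = m.toNat ||| 2 ^ b.toNat := by
      show ((m.toNat ||| (pvShl 1 b).toNat : Nat) : Int).toNat = _
      rw [Int.toNat_natCast]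
      congr 1
      show (((1 : Int).toNat <<< b.toNat : Nat) : Int).toNat = 2 ^ b.toNat
      rw [Int.toNat_natCast, Nat.shiftLeft_eq]
      norm_num
    rw [h1, Nat.testBit_lor, Nat.testBit_two_pow]
    have h2 : decide (b.toNat = s) = decide ((s : Int) = b) := by
      rcases eq_or_ne ((s : Int)) b with he | hne
      · have : b.toNat = s := by omega
        simp [he, this]
      · have : b.toNat ≠ s := by omega
        simp [hne, this]
    rw [h2]
    have h3 : decide ((s : Int) ∈ b :: t) = (decide ((s : Int) = b) || decide ((s : Int) ∈ t)) := by
      rw [← Bool.decide_or]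
      simp [List.mem_cons]
    rw [h3]
    cases m.toNat.testBit s <;> cases hd : decide ((s : Int) = b) <;>
      cases ht : decide ((s : Int) ∈ t) <;> simp


-- ---------- the state invariant linking B's seen mask to the result set ----------

def InvBS (acc : PySem.Set Int) (seen : Int) : Prop :=
  (∀ x ∈ acc, 0 ≤ x) ∧ ∀ s : Nat, seen.toNat.testBit s = decide ((s : Int) ∈ acc)

-- ---------- row equality and the outer induction ----------

-- A's inner loop (break included) is a fold of Set.add over the takeWhile prefix, mapped to sums
lemma innerA_eq (n a : Int) (xs : List Int) (acc : PySem.Set Int) :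
    innerA n a xs acc =
      ((xs.takeWhile (fun b => decide (a + b ≤ n))).map (fun b => a + b)).foldl PySem.Set.add acc := by
  induction xs generalizing acc with
  | nil => simp [innerA]
  | cons b bs ih =>
    by_cases hb : a + b ≤ n
    · simp [innerA, hb, ih]
    · simp [innerA, hb]

lemma update_eq_foldl (s : PySem.Set Int) (l : List Int) :
    l.foldl PySem.Set.add s = PySem.Set.update s l := rfl

lemma update_eq_foldl' (s : PySem.Set Int) (l : List Int) :
    l.foldl (fun r x => PySem.Set.add r x) s = PySem.Set.update s l := rfl

lemma toNat_pvShl (x k : Int) : (pvShl x k).toNat = x.toNat <<< k.toNat := Int.toNat_natCast _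
lemma toNat_pvShr (x k : Int) : (pvShr x k).toNat = x.toNat >>> k.toNat := Int.toNat_natCast _
lemma toNat_pvOr (x y : Int) : (pvOr x y).toNat = x.toNat ||| y.toNat := Int.toNat_natCast _
lemma toNat_pvAnd (x y : Int) : (pvAnd x y).toNat = x.toNat &&& y.toNat := Int.toNat_natCast _
lemma toNat_pvAndNot (x y : Int) :
    (pvAndNot x y).toNat = x.toNat ^^^ (x.toNat &&& y.toNat) := Int.toNat_natCast _

lemma row_step (L : List Int) (hlt : L.Pairwise (· < ·)) (hlb : ∀ b ∈ L, 1 ≤ b)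
    (hub : ∀ b ∈ L, b ≤ 28123) (n mask : Int)
    (hmask : ∀ s : Nat, mask.toNat.testBit s = decide ((s : Int) ∈ L))
    (i : Nat) (hi : i < L.length) (acc : PySem.Set Int) (seen : Int) (hinv : InvBS acc seen) :
    ∃ seen',
      loopB n mask (L.drop i) acc seen =
        loopB n mask (L.drop (i + 1)) (innerA n L[i] (L.drop i) acc) seen' ∧
      InvBS (innerA n L[i] (L.drop i) acc) seen' := by
  have hdrop : L.drop i = L[i] :: L.drop (i + 1) := List.drop_eq_getElem_cons hi
  set a := L[i] with ha
  have haL : a ∈ L := List.getElem_mem hi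
  have ha1 : 1 ≤ a := hlb a haL
  have ha2 : a ≤ 28123 := hub a haL
  -- A's inner pass as a fold over the row list
  have hple : (L.drop i).Pairwise (· ≤ ·) := (hlt.sublist (List.drop_sublist _ _)).imp le_of_lt
  have hAfold : innerA n a (L.drop i) acc =
      (((L.drop i).takeWhile (fun b => decide (a + b ≤ n))).map (fun b => a + b)).foldl
        PySem.Set.add acc := innerA_eq n a (L.drop i) acc
  have hsub : (((L.drop i).takeWhile (fun b => decide (a + b ≤ n)))).Sublist L :=
    (List.takeWhile_sublist _).trans (List.drop_sublist _ _)
  have hApw : (((L.drop i).takeWhile (fun b => decide (a + b ≤ n))).map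
      (fun b => a + b)).Pairwise (· < ·) :=
    List.pairwise_map.mpr ((hlt.sublist hsub).imp (fun h => by omega))
  have hAmem : ∀ x, x ∈ ((L.drop i).takeWhile (fun b => decide (a + b ≤ n))).map (fun b => a + b) ↔
      ((x - a) ∈ L ∧ a ≤ x - a ∧ x ≤ n) := by
    intro x
    constructor
    · intro hx
      obtain ⟨b, hb, hbs⟩ := List.mem_map.mp hx
      rw [mem_takeWhile_sorted a n _ hple] at hb
      obtain ⟨hbd, hbn⟩ := hb
      rw [mem_drop_sorted L hlt i hi] at hbd
      obtain ⟨hbL, hab⟩ := hbd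
      have hxb : x - a = b := by omega
      rw [hxb]
      exact ⟨hbL, by omega, by omega⟩
    · rintro ⟨h1, h2, h3⟩
      rw [List.mem_map]
      refine ⟨x - a, ?_, by omega⟩
      rw [mem_takeWhile_sorted a n _ hple]
      refine ⟨?_, by omega⟩
      rw [mem_drop_sorted L hlt i hi]
      exact ⟨h1, h2⟩
  by_cases hw : min n (a + 28123) + 1 - 2 * a ≤ 0
  -- empty row: B skips ('continue'), A's inner loop breaks at once
  · have hn2a : n < 2 * a := by omega
    have hempty : innerA n a (L.drop i) acc = acc := by
      rw [hdrop, innerA, if_neg (by omega)]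
    refine ⟨seen, ?_, ?_⟩
    · conv_lhs => rw [hdrop]
      rw [loopB, if_pos hw, hempty]
    · rw [hempty]; exact hinv
  -- nonempty row: B produces the row by shift/mask and extracts the unseen bits
  · have hw' : 0 < min n (a + 28123) + 1 - 2 * a := by omega
    -- abbreviations matching loopB's lets
    obtain ⟨hnn, hseen⟩ := hinv
    set width : Int := min n (a + 28123) + 1 - 2 * a with hwidth
    set rowI : Int := pvShl (pvAnd (pvShr mask a) (pvShl 1 width - 1)) (2 * a) with hrowI
    set newI : Int := pvAndNot rowI seen with hnewI
    -- bit characterisation of the row mask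
    have hrowbit : ∀ s : Nat, rowI.toNat.testBit s =
        decide (2 * a ≤ (s : Int) ∧ (s : Int) ≤ min n (a + 28123) ∧ ((s : Int) - a) ∈ L) := by
      intro s
      have h2w : (1 : Nat) ≤ 2 ^ width.toNat := Nat.one_le_two_pow
      have hm1 : (pvShl 1 width - 1).toNat = 2 ^ width.toNat - 1 := by
        rw [pvShl_one width (by omega)]
        omega
      have htn : rowI.toNat =
          ((mask.toNat >>> a.toNat) &&& (2 ^ width.toNat - 1)) <<< (2 * a).toNat := by
        rw [hrowI, toNat_pvShl, toNat_pvAnd, toNat_pvShr, hm1]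
      rw [htn, Nat.testBit_shiftLeft, Nat.testBit_land, Nat.testBit_shiftRight,
        Nat.testBit_two_pow_sub_one, hmask]
      by_cases hge : (2 * a).toNat ≤ s
      · have hcast : ((a.toNat + (s - (2 * a).toNat) : Nat) : Int) = (s : Int) - a := by omega
        rw [hcast]
        have e1 : ((2 * a).toNat ≤ s) ↔ (2 * a ≤ (s : Int)) := by omega
        have e2 : (s - (2 * a).toNat < width.toNat) ↔ ((s : Int) ≤ min n (a + 28123)) := by omega
        rw [show (decide (s ≥ (2 * a).toNat) &&
              (decide (((s : Int) - a) ∈ L) && decide (s - (2 * a).toNat < width.toNat))) =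
            decide (s ≥ (2 * a).toNat ∧ (((s : Int) - a) ∈ L ∧ s - (2 * a).toNat < width.toNat))
          from by rw [Bool.decide_and, Bool.decide_and]]
        rw [decide_eq_decide]
        constructor
        · rintro ⟨u1, u2, u3⟩
          exact ⟨e1.mp u1, e2.mp u3, u2⟩
        · rintro ⟨u1, u2, u3⟩
          exact ⟨e1.mpr u1, u3, e2.mpr u2⟩
      · have hd1 : decide (s ≥ (2 * a).toNat) = false := decide_eq_false (by omega)
        rw [hd1]
        have hd2 : decide (2 * a ≤ (s : Int) ∧ (s : Int) ≤ min n (a + 28123) ∧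
            ((s : Int) - a) ∈ L) = false :=
          decide_eq_false (fun hcon => by obtain ⟨u1, -, -⟩ := hcon; omega)
        rw [hd2, Bool.false_and]
    -- bit characterisation of the unseen part
    have hnewbit : ∀ s : Nat, newI.toNat.testBit s =
        (rowI.toNat.testBit s && !seen.toNat.testBit s) := by
      intro s
      have htn : newI.toNat = rowI.toNat ^^^ (rowI.toNat &&& seen.toNat) := by
        rw [hnewI, toNat_pvAndNot]
      rw [htn, Nat.testBit_xor, Nat.testBit_land]
      cases rowI.toNat.testBit s <;> cases seen.toNat.testBit s <;> rfl
    have hnew0 : (0 : Int) ≤ newI := by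
      rw [hnewI]
      exact Int.natCast_nonneg _
    have hnewcast : ((newI.toNat : Nat) : Int) = newI := Int.toNat_of_nonneg hnew0
    -- the extracted ascending list is exactly the new part of A's row list
    have hasc : (peelB newI).reverse =
        (((L.drop i).takeWhile (fun b => decide (a + b ≤ n))).map (fun b => a + b)).filter
          (fun y => !(PySem.Set.contains acc y)) := by
      apply eq_of_pairwise_lt_of_mem_iff
      · rw [List.pairwise_reverse]
        rw [← hnewcast]
        exact peelB_pairwise newI.toNat
      · exact hApw.filter _
      · intro x
        rw [List.mem_reverse, ← hnewcast, peelB_mem newI.toNat x, List.mem_filter]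
        constructor
        · rintro ⟨s, rfl, hs⟩
          rw [hnewbit s] at hs
          obtain ⟨hrb, hsb⟩ := Bool.and_eq_true_iff.mp hs
          rw [hrowbit s] at hrb
          obtain ⟨u1, u2, u3⟩ := of_decide_eq_true hrb
          have hub3 : (s : Int) - a ≤ 28123 := hub _ u3
          constructor
          · rw [hAmem]
            exact ⟨u3, by omega, by omega⟩
          · rw [hseen s] at hsb
            simp only [Bool.not_eq_true'] at hsb
            simp [hsb]
        · rintro ⟨hx, hnacc⟩
          have hx' := (hAmem x).mp hx
          obtain ⟨u1, u2, u3⟩ := hx'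
          have hxl : 1 ≤ x - a := hlb _ u1
          have hxu : x - a ≤ 28123 := hub _ u1
          have hx0 : (0 : Int) ≤ x := by omega
          refine ⟨x.toNat, by omega, ?_⟩
          rw [hnewbit, hrowbit]
          have hxc : ((x.toNat : Nat) : Int) = x := Int.toNat_of_nonneg hx0
          have h1 : decide (2 * a ≤ ((x.toNat : Nat) : Int) ∧
              ((x.toNat : Nat) : Int) ≤ min n (a + 28123) ∧
              (((x.toNat : Nat) : Int) - a) ∈ L) = true := by
            rw [hxc]
            exact decide_eq_true ⟨by omega, by omega, u1⟩
          rw [h1, hseen x.toNat, hxc]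
          simp only [Bool.not_eq_true'] at hnacc ⊢
          simp only [Bool.true_and]
          simp at hnacc ⊢
          exact hnacc
    -- row lists are duplicate-free
    have hAnodup : (((L.drop i).takeWhile (fun b => decide (a + b ≤ n))).map
        (fun b => a + b)).Nodup := hApw.imp (fun h => ne_of_lt h)
    have hFnodup : ((((L.drop i).takeWhile (fun b => decide (a + b ≤ n))).map
        (fun b => a + b)).filter (fun y => !(PySem.Set.contains acc y))).Nodup :=
      hAnodup.filter _
    -- both folds append exactly the new row elements
    have hrow : innerA n a (L.drop i) acc =
        (peelB newI).reverse.foldl (fun r x => PySem.Set.add r x) acc := by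
      rw [hAfold, update_eq_foldl, hasc, update_eq_foldl',
        PySem.Set.update_eq_append_filter, PySem.Set.update_eq_append_filter,
        PySem.Set.ofList_eq_self_of_nodup _ hAnodup,
        PySem.Set.ofList_eq_self_of_nodup _ hFnodup, List.filter_filter]
      congr 1
      apply List.filter_congr
      intro x _
      rw [Bool.and_self]
    refine ⟨pvOr seen rowI, ?_, ?_⟩
    · conv_lhs => rw [hdrop]
      rw [loopB, if_neg hw, hrow]
    · constructor
      · intro x hx
        rw [hAfold, update_eq_foldl, PySem.Set.update_eq_append_filter] at hx
        rcases List.mem_append.mp hx with hx | hx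
        · exact hnn x hx
        · have := (List.mem_filter.mp hx).1
          rw [PySem.Set.ofList_eq_self_of_nodup _ hAnodup] at this
          obtain ⟨u1, u2, u3⟩ := (hAmem x).mp this
          have := hlb _ u1
          omega
      · intro s
        have htn : (pvOr seen rowI).toNat = seen.toNat ||| rowI.toNat := toNat_pvOr _ _
        rw [htn, Nat.testBit_lor, hseen s, hrowbit s]
        have hmem : ((s : Int) ∈ innerA n a (L.drop i) acc) ↔
            ((s : Int) ∈ acc ∨ (2 * a ≤ (s : Int) ∧ (s : Int) ≤ min n (a + 28123) ∧
              ((s : Int) - a) ∈ L)) := by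
          rw [hAfold, update_eq_foldl, PySem.Set.update_eq_append_filter, List.mem_append,
            PySem.Set.ofList_eq_self_of_nodup _ hAnodup, List.mem_filter]
          constructor
          · rintro (h | ⟨h1, h2⟩)
            · exact Or.inl h
            · obtain ⟨u1, u2, u3⟩ := (hAmem _).mp h1
              have : (s : Int) - a ≤ 28123 := hub _ u1
              exact Or.inr ⟨by omega, by omega, u1⟩
          · rintro (h | ⟨h1, h2, h3⟩)
            · exact Or.inl h
            · by_cases hacc : (s : Int) ∈ acc
              · exact Or.inl hacc
              · right
                refine ⟨(hAmem _).mpr ⟨h3, by omega, by omega⟩, ?_⟩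
                simp [hacc]
        rcases Decidable.em ((s : Int) ∈ acc) with hin | hout
        · rw [decide_eq_true hin, decide_eq_true (hmem.mpr (Or.inl hin)), Bool.true_or]
        · by_cases hrc : (2 * a ≤ (s : Int) ∧ (s : Int) ≤ min n (a + 28123) ∧
              ((s : Int) - a) ∈ L)
          · rw [decide_eq_true hrc, decide_eq_true (hmem.mpr (Or.inr hrc)), Bool.or_true]
          · have hni : ¬ ((s : Int) ∈ innerA n a (L.drop i) acc) := by
              rw [hmem]; tauto
            rw [decide_eq_false hout, decide_eq_false hrc, decide_eq_false hni, Bool.or_self]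

lemma outer_eq (L : List Int) (hlt : L.Pairwise (· < ·)) (hlb : ∀ b ∈ L, 1 ≤ b)
    (hub : ∀ b ∈ L, b ≤ 28123) (n mask : Int)
    (hmask : ∀ s : Nat, mask.toNat.testBit s = decide ((s : Int) ∈ L)) :
    ∀ (d i : Nat) (acc : PySem.Set Int) (seen : Int), i + d = L.length → InvBS acc seen →
      outerA n (L.drop i) acc = loopB n mask (L.drop i) acc seen := by
  intro d
  induction d with
  | zero =>
    intro i acc seen hi hinv
    have : L.drop i = [] := List.drop_eq_nil_of_le (by omega)
    rw [this]
    simp [outerA, loopB]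
  | succ d ih =>
    intro i acc seen hi hinv
    have hilt : i < L.length := by omega
    have hdrop : L.drop i = L[i] :: L.drop (i + 1) := List.drop_eq_getElem_cons hilt
    obtain ⟨seen', hstep, hinv'⟩ := row_step L hlt hlb hub n mask hmask i hilt acc seen hinv
    rw [hstep]
    conv_lhs => rw [hdrop]
    show outerA n (L.drop (i + 1)) (innerA n L[i] (L[i] :: L.drop (i + 1)) acc) = _
    rw [← hdrop]
    exact ih (i + 1) (innerA n L[i] (L.drop i) acc) seen' (by omega) hinv'

-- ===== VERDICT (by name: the statement is the Claim_ definition above) =====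
theorem abundant_sums_spec : Claim_equal_abundant_sums := by
  intro n _
  show abundant_sums n = abundant_sums_alt n
  have hinv : InvBS PySem.Set.empty 0 := by
    constructor
    · intro x hx; simp [PySem.Set.empty] at hx
    · intro s
      show (Int.toNat 0).testBit s = decide ((s : Int) ∈ ([] : List Int))
      simp
  have hmask : ∀ s : Nat,
      ((abundant_nums 28123).foldl (fun m b => pvOr m (pvShl 1 b)) 0).toNat.testBit s =
        decide ((s : Int) ∈ abundant_nums 28123) := by
    intro s
    rw [mask_testBit (abundant_nums 28123)
      (fun b hb => le_trans (by norm_num) (abundant_nums_lb b hb)) 0 s]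
    simp
  have h := outer_eq (abundant_nums 28123) abundant_nums_lt abundant_nums_lb abundant_nums_ub n
    ((abundant_nums 28123).foldl (fun m b => pvOr m (pvShl 1 b)) 0) hmask
    (abundant_nums 28123).length 0 PySem.Set.empty 0 (Nat.zero_add _) hinv
  rw [List.drop_zero] at h
  exact h
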